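-- pv_equiv track=rewrite | github.com/niusealeo/hyper-dimensional-Phragmen | phragmen/engine.py | tie_break_by_list_order
-- ===== SOURCE A (Python) =====
-- from typing import Dict, List, Optional, Set, Tuple
--
-- def party_rank_maps(party_lists: Dict[str, List[str]]) -> Dict[str, Dict[str, int]]:
--     return {pid: {c: i for i, c in enumerate(lst)} for pid, lst in party_lists.items()}
--
-- def tie_break_by_list_order(tied_candidates: List[str], lists: Dict[str, List[str]]) -> str:
--     """Tie-break using the best (lowest) rank index across any provided ordered lists.
--
--     The lists map key -> ordered list of candidates. A candidate may appear in 0+ lists.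
--     We select the candidate with the minimum rank across all lists; ties fall back to name.
--     If no candidates appear in any list, fall back to lexical.
--     """
--     rank_maps = party_rank_maps(lists)
--     best = None  # (rank_index, candidate)
--     for c in tied_candidates:
--         best_rank = None
--         for rm in rank_maps.values():
--             if c in rm:
--                 r = rm[c]
--                 if best_rank is None or r < best_rank:
--                     best_rank = r
--         if best_rank is not None:
--             key = (best_rank, c)
--             if best is None or key < best:
--                 best = key
--     return best[1] if best is not None else min(tied_candidates)
-- ===== SOURCE B (Python) =====
-- def tie_break_by_list_order(tied_candidates, lists):
--     """List-major single pass: scan every list once, recording for each tied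
--     candidate the best (lowest) rank seen, then take the (rank, name) minimum."""
--     tied = set(tied_candidates)
--     best_rank = {}
--     for lst in lists.values():
--         seen = {}
--         for i, c in enumerate(lst):
--             if c in tied:
--                 seen[c] = i
--         for c, r in seen.items():
--             if c not in best_rank or r < best_rank[c]:
--                 best_rank[c] = r
--     if best_rank:
--         return min((r, c) for c, r in best_rank.items())[1]
--     return min(tied_candidates)
-- ===== Notes on version B (the rewrite author's own statement) =====
-- stated objective: faster
-- what changed: Inverted the loop nesting: instead of probing every per-list rank map for each tied candidate, B scans each list once (membership-tested against a set of the tied candidates), accumulating a single best-rank dict, and takes the (rank, name) minimum of that dict at the end.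
import Mathlib
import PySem

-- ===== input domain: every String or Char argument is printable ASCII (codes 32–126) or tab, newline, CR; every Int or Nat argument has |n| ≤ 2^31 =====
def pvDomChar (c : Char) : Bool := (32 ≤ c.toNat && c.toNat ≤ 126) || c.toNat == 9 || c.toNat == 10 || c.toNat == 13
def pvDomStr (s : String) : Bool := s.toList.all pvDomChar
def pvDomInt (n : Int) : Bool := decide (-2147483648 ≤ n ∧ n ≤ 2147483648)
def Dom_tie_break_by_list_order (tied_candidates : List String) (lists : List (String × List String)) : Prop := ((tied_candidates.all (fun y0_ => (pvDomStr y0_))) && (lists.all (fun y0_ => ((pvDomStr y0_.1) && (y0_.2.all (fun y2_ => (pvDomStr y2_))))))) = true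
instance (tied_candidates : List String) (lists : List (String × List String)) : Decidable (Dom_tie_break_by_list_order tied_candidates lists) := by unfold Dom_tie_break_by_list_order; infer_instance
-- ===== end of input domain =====

-- B inverts A's loop nesting: one list-major scan with a set of the tied candidates and a
-- single best-rank dict, instead of probing every per-list rank map for each candidate.

-- ===== PORT A =====
-- helper = party_rank_maps's per-list dict comprehension {c: i for i, c in enumerate(lst)}
def pvRankMap (lst : List String) : PySem.Dict String Int :=
  (PySem.List.enumerate lst).foldl (fun d p => d.insert p.2 p.1) PySem.Dict.empty

-- Python tuple comparison (rank, name) < (rank, name): lexicographic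
def pvPairLt (p q : Int × String) : Bool :=
  decide (p.1 < q.1) || (p.1 == q.1 && decide (p.2 < q.2))

def tie_break_by_list_order (tied_candidates : List String) (lists : List (String × List String)) : String :=
  let rank_maps : List (PySem.Dict String Int) := ((PySem.Dict.ofList lists).values).map pvRankMap
  let best : Option (Int × String) := tied_candidates.foldl (fun best c =>
    let best_rank : Option Int := rank_maps.foldl (fun br rm =>
      match rm.get? c with
      | some r =>
        match br with
        | none => some r
        | some b => if r < b then some r else some b
      | none => br) none
    match best_rank with
    | none => best
    | some br =>
      match best with
      | none => some (br, c)
      | some b => if pvPairLt (br, c) b then some (br, c) else some b) none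
  match best with
  | some p => p.2
  | none => (PySem.List.min? tied_candidates (fun x => x)).getD ""  -- min(tied_candidates); none only for tied_candidates = [], excluded by Pre_

-- ===== PORT B =====
def tie_break_by_list_order_alt (tied_candidates : List String) (lists : List (String × List String)) : String :=
  let tied : PySem.Set String := PySem.Set.ofList tied_candidates
  let best_rank : PySem.Dict String Int :=
    ((PySem.Dict.ofList lists).values).foldl (fun acc lst =>
      let seen : PySem.Dict String Int :=
        (PySem.List.enumerate lst).foldl (fun s p =>
          if PySem.Set.contains tied p.2 then s.insert p.2 p.1 else s) PySem.Dict.empty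
      seen.items.foldl (fun acc2 q =>
        if (match acc2.get? q.1 with | none => true | some b => decide (q.2 < b))
        then acc2.insert q.1 q.2 else acc2) acc) PySem.Dict.empty
  if best_rank.items ≠ [] then
    match PySem.List.min2? (best_rank.items.map (fun q => (q.2, q.1))) (fun p => p.1) (fun p => p.2) with
    | some m => m.2
    | none => ""  -- unreachable: the list is nonempty
  else (PySem.List.min? tied_candidates (fun x => x)).getD ""  -- min(tied_candidates); none only for tied_candidates = [], excluded by Pre_

-- ===== PRECONDITION & SPEC =====
-- Pre_ excludes only tied_candidates = [], on which both Pythons raise ValueError (min of empty sequence).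
def Pre_tie_break_by_list_order (tied_candidates : List String) (lists : List (String × List String)) : Prop :=
  tied_candidates ≠ []
instance (tied_candidates : List String) (lists : List (String × List String)) : Decidable (Pre_tie_break_by_list_order tied_candidates lists) := by unfold Pre_tie_break_by_list_order; infer_instance

def pvWitness_tie_break_by_list_order : List String × (List (String × List String)) :=
  (["a", "b"], [("p", ["b", "a"])])

def Spec_tie_break_by_list_order (tied_candidates : List String) (lists : List (String × List String)) (out : String) : Prop := out = tie_break_by_list_order_alt tied_candidates lists
instance (tied_candidates : List String) (lists : List (String × List String)) (out : String) : Decidable (Spec_tie_break_by_list_order tied_candidates lists out) := by unfold Spec_tie_break_by_list_order; infer_instance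

-- ===== CLAIM (what is proved, stated in full; the proofs are below) =====
def Claim_equal_tie_break_by_list_order : Prop := ∀ (tied_candidates : List String) (lists : List (String × List String)), Dom_tie_break_by_list_order tied_candidates lists → Pre_tie_break_by_list_order tied_candidates lists → Spec_tie_break_by_list_order tied_candidates lists (tie_break_by_list_order tied_candidates lists)

-- ===== LEMMAS AND PROOFS =====

-- the strict lexicographic order on (rank, name) pairs, as a Prop
def pvLexLt (p q : Int × String) : Prop := p.1 < q.1 ∨ (p.1 = q.1 ∧ p.2 < q.2)

-- running minimum of an optional rank: one step of A's inner loop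
def pvOStep (br : Option Int) (x : Option Int) : Option Int :=
  match x with
  | some r =>
    match br with
    | none => some r
    | some b => if r < b then some r else some b
  | none => br

-- the best (lowest, last-occurrence-per-list) rank of candidate c across the lists
def pvM (vals : List (List String)) (c : String) : Option Int :=
  vals.foldl (fun br lst => pvOStep br ((pvRankMap lst).get? c)) none

-- the (rank, name) pairs A's outer loop considers, in tied order
def pvPairs (vals : List (List String)) (tied : List String) : List (Int × String) :=
  tied.filterMap (fun c => (pvM vals c).map (fun r => (r, c)))

-- first-minimum fold shared by A's outer loop and min2?
def pvMFold (cond : (Int × String) → (Int × String) → Bool) (l : List (Int × String)) : Option (Int × String) :=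
  l.foldl (fun acc x => match acc with | none => some x | some m => if cond x m then some x else some m) none

theorem pvLexLt_trans {p q r : Int × String} (h1 : pvLexLt p q) (h2 : pvLexLt q r) : pvLexLt p r := by
  rcases h1 with h1 | ⟨h1, h1'⟩ <;> rcases h2 with h2 | ⟨h2, h2'⟩
  · exact Or.inl (lt_trans h1 h2)
  · exact Or.inl (h2 ▸ h1)
  · exact Or.inl (h1 ▸ h2)
  · exact Or.inr ⟨h1.trans h2, lt_trans h1' h2'⟩

theorem pvLexLt_irrefl (p : Int × String) : ¬ pvLexLt p p := by
  rintro (h | ⟨-, h⟩) <;> exact lt_irrefl _ h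

theorem pvLexLt_connex {p q : Int × String} (h1 : ¬ pvLexLt p q) (h2 : ¬ pvLexLt q p) : p = q := by
  simp only [pvLexLt, not_or, not_and] at h1 h2
  have hfst : p.1 = q.1 := le_antisymm (not_lt.mp h2.1) (not_lt.mp h1.1)
  have hsnd : p.2 = q.2 := le_antisymm (not_lt.mp (h2.2 hfst.symm)) (not_lt.mp (h1.2 hfst))
  exact Prod.ext hfst hsnd

theorem pvPairLt_iff (p q : Int × String) : pvPairLt p q = true ↔ pvLexLt p q := by
  simp [pvPairLt, pvLexLt]

theorem pvMin2Cond_iff (p q : Int × String) :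
    (decide (p.1 < q.1) || !decide (q.1 < p.1) && decide (p.2 < q.2)) = true ↔ pvLexLt p q := by
  simp only [pvLexLt, Bool.or_eq_true, Bool.and_eq_true, Bool.not_eq_true', decide_eq_true_eq,
    decide_eq_false_iff_not]
  constructor
  · rintro (h | ⟨h, h'⟩)
    · exact Or.inl h
    · rcases lt_or_ge p.1 q.1 with hl | hl
      · exact Or.inl hl
      · exact Or.inr ⟨le_antisymm (not_lt.mp h) hl, h'⟩
  · rintro (h | ⟨h, h'⟩)
    · exact Or.inl h
    · exact Or.inr ⟨by simp [h], h'⟩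

-- characterization of the first-minimum fold
theorem pvMFold_go {cond : (Int × String) → (Int × String) → Bool}
    (hcond : ∀ p q, cond p q = true ↔ pvLexLt p q) :
    ∀ (l : List (Int × String)) (m0 : Int × String),
      ∃ m, l.foldl (fun acc x => match acc with | none => some x | some m => if cond x m then some x else some m) (some m0) = some m ∧
        (m = m0 ∨ m ∈ l) ∧ (m = m0 ∨ pvLexLt m m0) ∧ ∀ y ∈ l, ¬ pvLexLt y m := by
  intro l
  induction l with
  | nil => exact fun m0 => ⟨m0, rfl, Or.inl rfl, Or.inl rfl, by simp⟩
  | cons x t ih =>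
    intro m0
    by_cases hx : pvLexLt x m0
    · have hc : cond x m0 = true := (hcond x m0).mpr hx
      obtain ⟨m, hm, hmem, hle, hmin⟩ := ih x
      refine ⟨m, by simpa [hc] using hm, ?_, ?_, ?_⟩
      · rcases hmem with h | h
        · exact Or.inr (h ▸ List.mem_cons_self)
        · exact Or.inr (List.mem_cons_of_mem _ h)
      · rcases hle with h | h
        · exact Or.inr (h ▸ hx)
        · exact Or.inr (pvLexLt_trans h hx)
      · intro y hy
        rcases List.mem_cons.mp hy with rfl | hy
        · rcases hle with h | h
          · exact h ▸ pvLexLt_irrefl m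
          · exact fun hc' => pvLexLt_irrefl _ (pvLexLt_trans h hc')
        · exact hmin y hy
    · have hc : cond x m0 = false := by
        cases h : cond x m0
        · rfl
        · exact absurd ((hcond x m0).mp h) hx
      obtain ⟨m, hm, hmem, hle, hmin⟩ := ih m0
      refine ⟨m, by simpa [hc] using hm, ?_, hle, ?_⟩
      · rcases hmem with h | h
        · exact Or.inl h
        · exact Or.inr (List.mem_cons_of_mem _ h)
      · intro y hy
        rcases List.mem_cons.mp hy with rfl | hy
        · rcases hle with h | h
          · exact h ▸ hx
          · exact fun hc' => hx (pvLexLt_trans hc' h)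
        · exact hmin y hy

theorem pvMFold_spec {cond : (Int × String) → (Int × String) → Bool}
    (hcond : ∀ p q, cond p q = true ↔ pvLexLt p q) (l : List (Int × String)) (hl : l ≠ []) :
    ∃ m, pvMFold cond l = some m ∧ m ∈ l ∧ ∀ y ∈ l, ¬ pvLexLt y m := by
  obtain ⟨x, t, rfl⟩ := List.exists_cons_of_ne_nil hl
  obtain ⟨m, hm, hmem, hle, hmin⟩ := pvMFold_go hcond t x
  refine ⟨m, hm, ?_, ?_⟩
  · rcases hmem with h | h
    · exact h ▸ List.mem_cons_self
    · exact List.mem_cons_of_mem _ h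
  · intro y hy
    rcases List.mem_cons.mp hy with rfl | hy
    · rcases hle with h | h
      · exact h ▸ pvLexLt_irrefl m
      · exact fun hc' => pvLexLt_irrefl _ (pvLexLt_trans h hc')
    · exact hmin y hy

-- two first-minimum folds over lists with the same members agree
theorem pvMFold_eq_of_mem_iff {cond1 cond2 : (Int × String) → (Int × String) → Bool}
    (h1 : ∀ p q, cond1 p q = true ↔ pvLexLt p q) (h2 : ∀ p q, cond2 p q = true ↔ pvLexLt p q)
    (l1 l2 : List (Int × String)) (hmem : ∀ x, x ∈ l1 ↔ x ∈ l2) :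
    pvMFold cond1 l1 = pvMFold cond2 l2 := by
  rcases eq_or_ne l1 [] with rfl | hl1
  · have hl2 : l2 = [] := List.eq_nil_iff_forall_not_mem.mpr (fun x hx => by simp [← hmem x] at hx)
    rw [hl2]; rfl
  · have hl2 : l2 ≠ [] := by
      obtain ⟨x, t, rfl⟩ := List.exists_cons_of_ne_nil hl1
      intro h
      have := (hmem x).mp List.mem_cons_self
      simp [h] at this
    obtain ⟨m1, hm1, hmem1, hmin1⟩ := pvMFold_spec h1 l1 hl1
    obtain ⟨m2, hm2, hmem2, hmin2⟩ := pvMFold_spec h2 l2 hl2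
    rw [hm1, hm2]
    have : m1 = m2 := pvLexLt_connex (hmin2 m1 ((hmem m1).mp hmem1)) (hmin1 m2 ((hmem m2).mpr hmem2))
    rw [this]

-- the inner fold of A over the mapped rank maps is pvM
theorem pvAInner_eq (vals : List (List String)) (c : String) :
    (vals.map pvRankMap).foldl (fun br rm =>
      match rm.get? c with
      | some r =>
        match br with
        | none => some r
        | some b => if r < b then some r else some b
      | none => br) none = pvM vals c := by
  rw [List.foldl_map]; rfl

-- A's outer fold is the first-minimum fold over pvPairs
theorem pvAFold_eq (vals : List (List String)) (tied : List String) :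
    ∀ (acc : Option (Int × String)),
      tied.foldl (fun best c =>
        match pvM vals c with
        | none => best
        | some br =>
          match best with
          | none => some (br, c)
          | some b => if pvPairLt (br, c) b then some (br, c) else some b) acc
      = (pvPairs vals tied).foldl (fun acc x => match acc with | none => some x | some m => if pvPairLt x m then some x else some m) acc := by
  induction tied with
  | nil => intro acc; rfl
  | cons c t ih =>
    intro acc
    simp only [List.foldl_cons, pvPairs, List.filterMap_cons]
    cases h : pvM vals c with
    | none => simpa [h] using ih _
    | some r => simpa [h] using ih _

-- B's seen dict is A's rank map restricted to the tied set
theorem pvSeen_get? (ts : PySem.Set String) (lst : List String) (c : String) :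
    ((PySem.List.enumerate lst).foldl (fun s p =>
        if PySem.Set.contains ts p.2 then s.insert p.2 p.1 else s) PySem.Dict.empty).get? c
    = if c ∈ ts then (pvRankMap lst).get? c else none := by
  suffices h : ∀ (l : List (Int × String)) (d1 d2 : PySem.Dict String Int),
      (∀ c, d2.get? c = if c ∈ ts then d1.get? c else none) →
      ∀ c, (l.foldl (fun s p => if PySem.Set.contains ts p.2 then s.insert p.2 p.1 else s) d2).get? c
        = if c ∈ ts then (l.foldl (fun d p => d.insert p.2 p.1) d1).get? c else none by
    exact h (PySem.List.enumerate lst) PySem.Dict.empty PySem.Dict.empty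
      (fun c => by simp [PySem.Dict.get?_empty]) c
  intro l
  induction l with
  | nil => intro d1 d2 h c; exact h c
  | cons p t ih =>
    intro d1 d2 h c
    simp only [List.foldl_cons]
    apply ih
    intro c'
    by_cases hts : p.2 ∈ ts
    · have : PySem.Set.contains ts p.2 = true := (PySem.Set.contains_iff ts p.2).mpr hts
      rw [this]
      simp only [if_true]
      rcases eq_or_ne c' p.2 with rfl | hne
      · simp [PySem.Dict.get?_insert_self, hts]
      · rw [PySem.Dict.get?_insert_of_ne _ _ hne, PySem.Dict.get?_insert_of_ne _ _ hne]
        exact h c'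
    · have : PySem.Set.contains ts p.2 = false := by
        cases hc : PySem.Set.contains ts p.2
        · rfl
        · exact absurd ((PySem.Set.contains_iff ts p.2).mp hc) hts
      rw [this]
      simp only [Bool.false_eq_true, if_false]
      rcases eq_or_ne c' p.2 with rfl | hne
      · simp [h p.2, hts]
      · rw [PySem.Dict.get?_insert_of_ne _ _ hne]
        exact h c'

theorem pvSeen_nodup (ts : PySem.Set String) (lst : List String) :
    ((PySem.List.enumerate lst).foldl (fun s p =>
        if PySem.Set.contains ts p.2 then s.insert p.2 p.1 else s) PySem.Dict.empty).keys.Nodup := by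
  suffices h : ∀ (l : List (Int × String)) (d : PySem.Dict String Int), d.keys.Nodup →
      (l.foldl (fun s p => if PySem.Set.contains ts p.2 then s.insert p.2 p.1 else s) d).keys.Nodup by
    exact h _ _ PySem.Dict.nodup_keys_empty
  intro l
  induction l with
  | nil => intro d h; exact h
  | cons p t ih =>
    intro d h
    simp only [List.foldl_cons]
    apply ih
    split
    · exact PySem.Dict.nodup_keys_insert _ _ _ h
    · exact h

-- the merge fold over an fst-nodup pair list, pointwise
theorem pvMerge_get? :
    ∀ (ps : List (String × Int)) (d : PySem.Dict String Int), (ps.map (·.1)).Nodup → ∀ (c : String),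
      (ps.foldl (fun acc2 q =>
          if (match acc2.get? q.1 with | none => true | some b => decide (q.2 < b))
          then acc2.insert q.1 q.2 else acc2) d).get? c
      = pvOStep (d.get? c) (Option.map (·.2) (ps.find? (fun p => p.1 == c))) := by
  intro ps
  induction ps with
  | nil => intro d _ c; rfl
  | cons q t ih =>
    intro d hn c
    simp only [List.map_cons, List.nodup_cons] at hn
    simp only [List.foldl_cons]
    rcases eq_or_ne q.1 c with rfl | hne
    · have hfind : t.find? (fun p => p.1 == q.1) = none := by
        rw [List.find?_eq_none]
        intro p hp
        simp only [beq_iff_eq]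
        exact fun h => hn.1 (h ▸ List.mem_map_of_mem hp)
      rw [List.find?_cons_of_pos (by simp), ih _ hn.2, hfind]
      cases hd : d.get? q.1 with
      | none => simp [pvOStep, hd, PySem.Dict.get?_insert_self]
      | some b =>
        by_cases hlt : q.2 < b
        · simp [pvOStep, hd, hlt, PySem.Dict.get?_insert_self]
        · simp [pvOStep, hd, hlt]
    · rw [List.find?_cons_of_neg (by simp [hne]), ih _ hn.2]
      congr 1
      by_cases hC : (match d.get? q.1 with | none => true | some b => decide (q.2 < b)) = true
      · rw [if_pos hC]
        exact PySem.Dict.get?_insert_of_ne _ _ (Ne.symm hne)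
      · rw [if_neg hC]

theorem pvMerge_nodup :
    ∀ (ps : List (String × Int)) (d : PySem.Dict String Int), d.keys.Nodup →
      (ps.foldl (fun acc2 q =>
          if (match acc2.get? q.1 with | none => true | some b => decide (q.2 < b))
          then acc2.insert q.1 q.2 else acc2) d).keys.Nodup := by
  intro ps
  induction ps with
  | nil => intro d h; exact h
  | cons q t ih =>
    intro d h
    simp only [List.foldl_cons]
    apply ih
    by_cases hC : (match d.get? q.1 with | none => true | some b => decide (q.2 < b)) = true
    · rw [if_pos hC]
      exact PySem.Dict.nodup_keys_insert _ _ _ h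
    · rw [if_neg hC]
      exact h

-- B's best_rank dict, pointwise: the fold over the lists computes pvM on the tied set
theorem pvBestRank_get? (tied_candidates : List String) :
    ∀ (vals : List (List String)) (acc : PySem.Dict String Int) (f : String → Option Int),
      (∀ c, acc.get? c = if c ∈ tied_candidates then f c else none) →
      ∀ c, ((vals.foldl (fun acc lst =>
          ((PySem.List.enumerate lst).foldl (fun s p =>
              if PySem.Set.contains (PySem.Set.ofList tied_candidates) p.2 then s.insert p.2 p.1 else s) PySem.Dict.empty).items.foldl
            (fun acc2 q =>
              if (match acc2.get? q.1 with | none => true | some b => decide (q.2 < b))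
              then acc2.insert q.1 q.2 else acc2) acc) acc).get? c)
        = if c ∈ tied_candidates then vals.foldl (fun br lst => pvOStep br ((pvRankMap lst).get? c)) (f c) else none := by
  intro vals
  induction vals with
  | nil => intro acc f h c; simpa using h c
  | cons lst t ih =>
    intro acc f h c
    simp only [List.foldl_cons]
    apply ih
    intro c'
    have hnod : ((((PySem.List.enumerate lst).foldl (fun s p =>
        if PySem.Set.contains (PySem.Set.ofList tied_candidates) p.2 then s.insert p.2 p.1 else s) PySem.Dict.empty)).items.map (·.1)).Nodup :=
      pvSeen_nodup (PySem.Set.ofList tied_candidates) lst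
    rw [pvMerge_get? _ _ hnod c']
    have hfind : Option.map (·.2) ((((PySem.List.enumerate lst).foldl (fun s p =>
        if PySem.Set.contains (PySem.Set.ofList tied_candidates) p.2 then s.insert p.2 p.1 else s) PySem.Dict.empty)).items.find? (fun p => p.1 == c'))
        = (((PySem.List.enumerate lst).foldl (fun s p =>
        if PySem.Set.contains (PySem.Set.ofList tied_candidates) p.2 then s.insert p.2 p.1 else s) PySem.Dict.empty)).get? c' := rfl
    rw [hfind, pvSeen_get?, h c']
    by_cases hc : c' ∈ tied_candidates
    · simp [hc, PySem.Set.mem_ofList]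
    · simp [hc, PySem.Set.mem_ofList, pvOStep]

theorem pvBestRank_nodup (tied_candidates : List String) (vals : List (List String)) :
    ∀ (acc : PySem.Dict String Int), acc.keys.Nodup →
      (vals.foldl (fun acc lst =>
          ((PySem.List.enumerate lst).foldl (fun s p =>
              if PySem.Set.contains (PySem.Set.ofList tied_candidates) p.2 then s.insert p.2 p.1 else s) PySem.Dict.empty).items.foldl
            (fun acc2 q =>
              if (match acc2.get? q.1 with | none => true | some b => decide (q.2 < b))
              then acc2.insert q.1 q.2 else acc2) acc) acc).keys.Nodup := by
  induction vals with
  | nil => intro acc h; exact h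
  | cons lst t ih =>
    intro acc h
    simp only [List.foldl_cons]
    exact ih _ (pvMerge_nodup _ _ h)

-- ===== VERDICT (by name: the statement is the Claim_ definition above) =====
theorem tie_break_by_list_order_spec : Claim_equal_tie_break_by_list_order := by
  intro tied lists _ hpre
  unfold Spec_tie_break_by_list_order
  simp only [tie_break_by_list_order, tie_break_by_list_order_alt]
  simp only [pvAInner_eq, pvAFold_eq ((PySem.Dict.ofList lists).values) tied none]
  have hBR := pvBestRank_get? tied ((PySem.Dict.ofList lists).values) PySem.Dict.empty
    (fun _ => none) (fun c => by simp [PySem.Dict.get?_empty])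
  have hBRnodup := pvBestRank_nodup tied ((PySem.Dict.ofList lists).values) PySem.Dict.empty
    PySem.Dict.nodup_keys_empty
  set BR := (((PySem.Dict.ofList lists).values).foldl (fun acc lst =>
      ((PySem.List.enumerate lst).foldl (fun s p =>
          if PySem.Set.contains (PySem.Set.ofList tied) p.2 then s.insert p.2 p.1 else s) PySem.Dict.empty).items.foldl
        (fun acc2 q =>
          if (match acc2.get? q.1 with | none => true | some b => decide (q.2 < b))
          then acc2.insert q.1 q.2 else acc2) acc) PySem.Dict.empty) with hBRdef
  have hget : ∀ c r, BR.get? c = some r ↔ (c, r) ∈ BR.items :=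
    fun c r => PySem.Dict.get?_eq_some_iff_mem_items BR c r hBRnodup
  have hmem : ∀ x, x ∈ pvPairs ((PySem.Dict.ofList lists).values) tied ↔ x ∈ BR.items.map (fun q => (q.2, q.1)) := by
    rintro ⟨r, c⟩
    simp only [pvPairs, List.mem_filterMap, List.mem_map, Option.map_eq_some_iff]
    constructor
    · rintro ⟨c', hc', r', hr', heq⟩
      refine ⟨(c', r'), ?_, heq⟩
      rw [← hget, hBR c']
      simp only [hc', if_true]
      exact hr'
    · rintro ⟨⟨c', r'⟩, hmem', heq⟩
      have hv := (hget c' r').mpr hmem'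
      rw [hBR c'] at hv
      by_cases hc : c' ∈ tied
      · exact ⟨c', hc, r', by simpa [hc] using hv, heq⟩
      · simp [hc] at hv
  by_cases hnil : BR.items = []
  · have hP : pvPairs ((PySem.Dict.ofList lists).values) tied = [] := by
      rw [List.eq_nil_iff_forall_not_mem]
      intro x hx
      have := (hmem x).mp hx
      simp [hnil] at this
    rw [hP]
    simp [hnil, pvMFold]
  · have hPne : pvPairs ((PySem.Dict.ofList lists).values) tied ≠ [] := by
      intro h
      apply hnil
      have hmapnil : BR.items.map (fun q => (q.2, q.1)) = [] := by
        rw [List.eq_nil_iff_forall_not_mem]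
        intro x hx
        have := (hmem x).mpr hx
        simp [h] at this
      exact List.map_eq_nil_iff.mp hmapnil
    obtain ⟨m, hm, _, _⟩ := pvMFold_spec pvPairLt_iff _ hPne
    have heq : pvMFold pvPairLt (pvPairs ((PySem.Dict.ofList lists).values) tied)
        = pvMFold (fun p q => decide (p.1 < q.1) || !decide (q.1 < p.1) && decide (p.2 < q.2)) (BR.items.map (fun q => (q.2, q.1))) :=
      pvMFold_eq_of_mem_iff pvPairLt_iff pvMin2Cond_iff _ _ hmem
    have hmin2 : PySem.List.min2? (BR.items.map (fun q => (q.2, q.1))) (fun p => p.1) (fun p => p.2) = some m := by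
      have hdef : PySem.List.min2? (BR.items.map (fun q => (q.2, q.1))) (fun p : Int × String => p.1) (fun p => p.2)
          = pvMFold (fun p q => decide (p.1 < q.1) || !decide (q.1 < p.1) && decide (p.2 < q.2)) (BR.items.map (fun q => (q.2, q.1))) := by
        unfold PySem.List.min2? pvMFold
        congr 1
        funext acc x
        cases acc <;> rfl
      rw [hdef, ← heq, hm]
    have hA : (pvPairs ((PySem.Dict.ofList lists).values) tied).foldl
        (fun acc x => match acc with | none => some x | some m => if pvPairLt x m then some x else some m) none = some m := hm
    rw [if_pos hnil, hA, hmin2]
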